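-- pv_equiv track=rewrite | github.com/smokingkrillz/Cryptography-assignment | oppgave 1.py | find_k_and_m
-- ===== SOURCE A (Python) =====
-- def find_k_and_m(number):
--     n = number-1
--     it = 0
--     m = 0
--     for i in range(0,512):
--         if(n % 2 != 0):
--             m = n
--             it = i
--             break
--         n = n >> 1
--     return it,m
-- ===== SOURCE B (Python) =====
-- def find_k_and_m(number):
--     n = number - 1
--     if n == 0:
--         return 0, 0
--     k = (n & -n).bit_length() - 1
--     return k, n >> k
-- ===== Notes on version B (the rewrite author's own statement) =====
-- stated objective: alternative
-- what changed: Replaces A's bounded shift-and-test loop with a closed-form bit computation: the lowest set bit n & -n and its bit_length give k directly, and m = n >> k.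
import Mathlib
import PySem

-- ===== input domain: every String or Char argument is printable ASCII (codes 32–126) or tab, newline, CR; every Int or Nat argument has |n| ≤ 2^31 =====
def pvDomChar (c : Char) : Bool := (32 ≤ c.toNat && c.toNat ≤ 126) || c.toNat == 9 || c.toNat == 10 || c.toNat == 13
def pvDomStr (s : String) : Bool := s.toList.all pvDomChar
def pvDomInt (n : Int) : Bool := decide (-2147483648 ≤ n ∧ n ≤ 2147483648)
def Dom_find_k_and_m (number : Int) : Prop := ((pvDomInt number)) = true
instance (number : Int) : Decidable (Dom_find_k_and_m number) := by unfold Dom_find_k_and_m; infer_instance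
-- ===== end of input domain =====

-- B replaces A's shift-and-test loop by the closed-form bit computation k = (n & -n).bit_length() - 1, m = n >> k (alternative formulation, not claimed faster).

-- ===== PORT A =====
-- the for-loop over the range: returns (i, n) at the break, (0, 0) (the initial it, m) if the loop runs out
def pvLoopA : List Int → Int → Int × Int
  | [], _ => (0, 0)
  | i :: rest, n => if PySem.Int.mod n 2 ≠ 0 then (i, n) else pvLoopA rest (n >>> (1 : Nat))

def find_k_and_m (number : Int) : Int × Int :=
  pvLoopA (PySem.List.pyRange 0 512) (number - 1)

-- ===== PORT B =====
def find_k_and_m_alt (number : Int) : Int × Int :=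
  let n := number - 1
  if n = 0 then (0, 0)
  else
    let k : Int := (PySem.Int.bitLength (PySem.Int.band n (-n)) : Int) - 1
    (k, n >>> k.toNat)

-- ===== PRECONDITION & SPEC =====
def Spec_find_k_and_m (number : Int) (out : Int × Int) : Prop := out = find_k_and_m_alt number
instance (number : Int) (out : Int × Int) : Decidable (Spec_find_k_and_m number out) := by unfold Spec_find_k_and_m; infer_instance

-- ===== CLAIM (what is proved, stated in full; the proofs are below) =====
def Claim_equal_find_k_and_m : Prop := ∀ (number : Int), Dom_find_k_and_m number → Spec_find_k_and_m number (find_k_and_m number)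

-- ===== LEMMAS AND PROOFS =====

-- lowest set bit of a positive natural, as Python's n & -n computes it
def pvLowbit (a : Nat) : Nat := a - (a &&& (a - 1))

theorem pv_and_pred_odd (a : Nat) (h : a % 2 = 1) : a &&& (a - 1) = a - 1 := by
  apply Nat.eq_of_testBit_eq
  intro i
  rw [Nat.testBit_and]
  cases i with
  | zero =>
    rw [Nat.testBit_zero, Nat.testBit_zero]
    have h1 : (a - 1) % 2 = 0 := by omega
    simp [h1]
  | succ j =>
    rw [Nat.testBit_succ, Nat.testBit_succ]
    have h1 : a / 2 = (a - 1) / 2 := by omega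
    rw [h1, Bool.and_self]

theorem pv_and_pred_even (b : Nat) (hb : 0 < b) :
    (2 * b) &&& (2 * b - 1) = 2 * (b &&& (b - 1)) := by
  apply Nat.eq_of_testBit_eq
  intro i
  rw [Nat.testBit_and]
  cases i with
  | zero =>
    rw [Nat.testBit_zero, Nat.testBit_zero, Nat.testBit_zero]
    have h1 : (2 * b) % 2 = 0 := by omega
    have h2 : (2 * (b &&& (b - 1))) % 2 = 0 := by omega
    simp [h1, h2]
  | succ j =>
    have h1 : (2 * b) / 2 = b := by omega
    have h2 : (2 * b - 1) / 2 = b - 1 := by omega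
    have h3 : (2 * (b &&& (b - 1))) / 2 = b &&& (b - 1) := by omega
    rw [Nat.testBit_succ, Nat.testBit_succ, Nat.testBit_succ, h1, h2, h3, Nat.testBit_and]

theorem pvLowbit_odd (a : Nat) (h : a % 2 = 1) : pvLowbit a = 1 := by
  unfold pvLowbit
  rw [pv_and_pred_odd a h]
  omega

theorem pvLowbit_even (b : Nat) (hb : 0 < b) : pvLowbit (2 * b) = 2 * pvLowbit b := by
  unfold pvLowbit
  rw [pv_and_pred_even b hb]
  have h1 : b &&& (b - 1) ≤ b - 1 := Nat.and_le_right
  omega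

theorem pvLowbit_pos (a : Nat) (ha : 0 < a) : 0 < pvLowbit a := by
  unfold pvLowbit
  have h1 : a &&& (a - 1) ≤ a - 1 := Nat.and_le_right
  omega

-- Python's n & -n equals the lowest set bit of |n|, for n ≠ 0
theorem pv_band_neg_self (n : Int) (hn : n ≠ 0) :
    PySem.Int.band n (-n) = ((pvLowbit n.natAbs : Nat) : Int) := by
  unfold PySem.Int.band pvLowbit
  rcases lt_or_gt_of_ne hn with hneg | hpos
  · have h1 : ¬ (0 ≤ n) := by omega
    have h2 : 0 ≤ -n := by omega
    simp only [h1, h2, if_true, if_false]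
    have e1 : (-n).toNat = n.natAbs := by omega
    have e2 : (-n - 1).toNat = n.natAbs - 1 := by omega
    rw [e1, e2]
  · have h1 : 0 ≤ n := by omega
    have h2 : ¬ (0 ≤ -n) := by omega
    simp only [h1, h2, if_true, if_false]
    have e1 : n.toNat = n.natAbs := by omega
    have e2 : (-(-n) - 1).toNat = n.natAbs - 1 := by omega
    rw [e1, e2]

-- the k that B computes, as a natural number
def pvK (n : Int) : Nat := PySem.Int.bitLength ((pvLowbit n.natAbs : Nat) : Int) - 1

theorem pv_bitLength_pos (x : Nat) (hx : 0 < x) : 1 ≤ PySem.Int.bitLength ((x : Nat) : Int) := by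
  by_contra h
  have h0 : PySem.Int.bitLength ((x : Nat) : Int) = 0 := by omega
  have h1 := PySem.Int.lt_two_pow_bitLength ((x : Nat) : Int)
  rw [h0] at h1
  simp at h1
  omega

theorem pvK_odd (n : Int) (h : PySem.Int.mod n 2 ≠ 0) : pvK n = 0 := by
  rw [PySem.Int.mod_eq_emod_of_pos (by norm_num : (0:Int) < 2)] at h
  have ha : n.natAbs % 2 = 1 := by omega
  unfold pvK
  rw [pvLowbit_odd n.natAbs ha]
  decide

theorem pv_shiftRight_succ (n : Int) (k : Nat) : n >>> (k + 1) = (n >>> (1 : Nat)) >>> k := by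
  cases n with
  | ofNat p =>
    show Int.ofNat (p >>> (k + 1)) = Int.ofNat ((p >>> 1) >>> k)
    rw [Nat.add_comm k 1, Nat.shiftRight_add]
  | negSucc p =>
    show Int.negSucc (p >>> (k + 1)) = Int.negSucc ((p >>> 1) >>> k)
    rw [Nat.add_comm k 1, Nat.shiftRight_add]

theorem pv_two_mul_shiftRight_one (m : Int) : (2 * m) >>> (1 : Nat) = m := by
  cases m with
  | ofNat p =>
    have e : (2 : Int) * Int.ofNat p = Int.ofNat (2 * p) := by
      simp [Int.ofNat_eq_natCast]
    rw [e]
    show Int.ofNat ((2 * p) >>> 1) = Int.ofNat p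
    congr 1
    omega
  | negSucc p =>
    have e : (2 : Int) * Int.negSucc p = Int.negSucc (2 * p + 1) := by
      rw [Int.negSucc_eq, Int.negSucc_eq]; push_cast; ring
    rw [e]
    show Int.negSucc ((2 * p + 1) >>> 1) = Int.negSucc p
    congr 1
    omega

theorem pvK_even (n : Int) (hn : n ≠ 0) (h : PySem.Int.mod n 2 = 0) :
    pvK n = pvK (n >>> (1 : Nat)) + 1 := by
  have hdvd : (2 : Int) ∣ n := (PySem.Int.mod_eq_zero_iff_dvd n 2).mp h
  obtain ⟨m, hm⟩ := hdvd
  subst hm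
  have hm0 : m ≠ 0 := by omega
  rw [pv_two_mul_shiftRight_one m]
  unfold pvK
  have e1 : (2 * m).natAbs = 2 * m.natAbs := by omega
  rw [e1, pvLowbit_even m.natAbs (by omega)]
  have hlp : 0 < pvLowbit m.natAbs := pvLowbit_pos m.natAbs (by omega)
  have e2 : PySem.Int.bitLength (((2 * pvLowbit m.natAbs : Nat) : Nat) : Int)
      = PySem.Int.bitLength ((pvLowbit m.natAbs : Nat) : Int) + 1 := by
    rw [PySem.Int.bitLength_natCast (by omega : 0 < 2 * pvLowbit m.natAbs)]
    congr 2
    omega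
  rw [e2]
  have hbl := pv_bitLength_pos (pvLowbit m.natAbs) hlp
  omega

theorem pvLoopA_zero (l : List Int) : pvLoopA l 0 = (0, 0) := by
  induction l with
  | nil => rfl
  | cons i rest ih =>
    simp [pvLoopA]
    exact ih

theorem pv_shiftRight_zero (n : Int) : n >>> (0 : Nat) = n := by
  cases n with
  | ofNat p => show Int.ofNat (p >>> 0) = Int.ofNat p; rw [Nat.shiftRight_zero]
  | negSucc p => show Int.negSucc (p >>> 0) = Int.negSucc p; rw [Nat.shiftRight_zero]

theorem pv_loop_main : ∀ (fuel : Nat) (start n : Int), n ≠ 0 → n.natAbs < 2 ^ fuel →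
    pvLoopA (PySem.List.pyRange start (start + (fuel : Int))) n
      = (start + (pvK n : Int), n >>> pvK n) := by
  intro fuel
  induction fuel with
  | zero =>
    intro start n hn hlt
    simp at hlt
    omega
  | succ f ih =>
    intro start n hn hlt
    rw [PySem.List.pyRange_one_cons (by push_cast; omega : start < start + ((f + 1 : Nat) : Int))]
    by_cases h : PySem.Int.mod n 2 ≠ 0
    · simp only [pvLoopA]
      rw [if_pos h, pvK_odd n h, pv_shiftRight_zero]
      norm_num
    · rw [not_not] at h
      simp only [pvLoopA]
      rw [if_neg (not_not_intro h)]
      have hdvd : (2 : Int) ∣ n := (PySem.Int.mod_eq_zero_iff_dvd n 2).mp h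
      obtain ⟨m, hm⟩ := hdvd
      have hm0 : m ≠ 0 := by omega
      have hsh : n >>> (1 : Nat) = m := by rw [hm]; exact pv_two_mul_shiftRight_one m
      have habs : m.natAbs < 2 ^ f := by
        have : n.natAbs = 2 * m.natAbs := by omega
        have hp : 2 ^ (f + 1) = 2 * 2 ^ f := by ring
        omega
      have erange : start + ((f + 1 : Nat) : Int) = (start + 1) + (f : Int) := by push_cast; ring
      rw [erange, hsh, ih (start + 1) m hm0 habs]
      have ek : pvK n = pvK m + 1 := by
        have := pvK_even n hn h
        rw [hsh] at this
        exact this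
      rw [ek, pv_shiftRight_succ n (pvK m), hsh]
      have e3 : start + ((pvK m + 1 : Nat) : Int) = start + 1 + ((pvK m : Nat) : Int) := by
        push_cast; ring
      rw [e3]

-- ===== VERDICT (by name: the statement is the Claim_ definition above) =====
theorem find_k_and_m_spec : Claim_equal_find_k_and_m := by
  intro number hdom
  unfold Spec_find_k_and_m find_k_and_m find_k_and_m_alt
  set n := number - 1 with hn
  by_cases h0 : n = 0
  · rw [h0, pvLoopA_zero]
    simp
  · have hdombound : n.natAbs < 2 ^ 32 := by
      unfold Dom_find_k_and_m pvDomInt at hdom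
      simp at hdom
      have : (2 : Nat) ^ 32 = 4294967296 := by norm_num
      omega
    have habs : n.natAbs < 2 ^ 512 :=
      lt_of_lt_of_le hdombound (Nat.pow_le_pow_right (by norm_num) (by norm_num))
    have er : (512 : Int) = (0 : Int) + ((512 : Nat) : Int) := by norm_num
    rw [er, pv_loop_main 512 0 n h0 habs]
    simp only [h0, if_false, pv_band_neg_self n h0]
    have hbl := pv_bitLength_pos (pvLowbit n.natAbs) (pvLowbit_pos n.natAbs (by omega))
    have ek : ((PySem.Int.bitLength ((pvLowbit n.natAbs : Nat) : Int) : Int) - 1)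
        = ((pvK n : Nat) : Int) := by
      unfold pvK
      omega
    rw [ek]
    simp
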